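-- pv_equiv track=rewrite | github.com/Cyanomous/the-anime-bot-bot | bottom.py | to_bottom
-- ===== SOURCE A (Python) =====
-- CHARACTER_VALUES = {
--     200: "🫂",
--     50: "💖",
--     10: "✨",
--     5: "🥺",
--     1: ",",
--     0: "❤️"
-- }
--
-- SECTION_SEPERATOR = '👉👈'
--
-- def to_bottom(text: str) -> str:
--     out = bytearray()
--
--     for char in text.encode():
--         while char != 0:
--             for value, emoji in CHARACTER_VALUES.items():
--                 if char >= value:
--                     char -= value
--                     out += emoji.encode()
--                     break
--
--         out += SECTION_SEPERATOR.encode()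
--
--     return out.decode('utf-8')
-- ===== SOURCE B (Python) =====
-- SECTION_SEPERATOR = '👉👈'
--
-- def to_bottom(text: str) -> str:
--     parts = []
--     for b in text.encode():
--         r = b % 200
--         parts.append(
--             "🫂" * (b // 200)
--             + "💖" * (r // 50)
--             + "✨" * (r % 50 // 10)
--             + "🥺" * (r % 50 % 10 // 5)
--             + "," * (r % 50 % 10 % 5)
--             + SECTION_SEPERATOR
--         )
--     return "".join(parts)
-- ===== Notes on version B (the rewrite author's own statement) =====
-- stated objective: simpler
-- what changed: Replaces the repeated-subtraction while/for greedy loop with direct divmod arithmetic per byte (counts computed by integer division), building each section in one expression and joining the parts.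
import Mathlib
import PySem

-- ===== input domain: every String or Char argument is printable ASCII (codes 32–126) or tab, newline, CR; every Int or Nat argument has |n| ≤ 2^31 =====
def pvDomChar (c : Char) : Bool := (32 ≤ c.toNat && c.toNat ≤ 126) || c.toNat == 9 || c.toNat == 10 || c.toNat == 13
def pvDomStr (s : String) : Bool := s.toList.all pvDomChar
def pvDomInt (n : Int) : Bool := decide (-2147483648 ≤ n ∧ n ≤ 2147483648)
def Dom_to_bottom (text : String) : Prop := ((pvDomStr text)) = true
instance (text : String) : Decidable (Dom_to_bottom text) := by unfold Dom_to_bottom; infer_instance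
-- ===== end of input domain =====

-- B replaces A's repeated-subtraction greedy loop with direct divmod arithmetic per byte (simpler).
-- On Dom (ASCII text) text.encode() yields exactly the char codes, so each port walks text.toList with c.toNat.

-- ===== PORT A =====
-- A's inner `while char != 0: for value, emoji in CHARACTER_VALUES.items(): if char >= value: ...`
-- transliterated: the dict iteration in insertion order is the if-chain 200, 50, 10, 5, 1
-- (the 1-entry always fires when char ≥ 1, so the 0-entry is unreachable inside the while).
def to_bottom_loop : Nat → String → String
  | 0, acc => acc
  | n+1, acc =>
    if n+1 ≥ 200 then to_bottom_loop (n+1-200) (acc ++ "🫂")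
    else if n+1 ≥ 50 then to_bottom_loop (n+1-50) (acc ++ "💖")
    else if n+1 ≥ 10 then to_bottom_loop (n+1-10) (acc ++ "✨")
    else if n+1 ≥ 5 then to_bottom_loop (n+1-5) (acc ++ "🥺")
    else to_bottom_loop n (acc ++ ",")
  termination_by n _ => n
  decreasing_by all_goals omega

def to_bottom (text : String) : String :=
  text.toList.foldl (fun out c => to_bottom_loop c.toNat out ++ "👉👈") ""

-- ===== PORT B =====
-- '🫂' * (b // 200) etc.
def pyRepeat : Nat → String → String
  | 0, _ => ""
  | k+1, s => s ++ pyRepeat k s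

def to_bottom_section (b : Nat) : String :=
  pyRepeat (b / 200) "🫂" ++ pyRepeat (b % 200 / 50) "💖" ++ pyRepeat (b % 200 % 50 / 10) "✨"
    ++ pyRepeat (b % 200 % 50 % 10 / 5) "🥺" ++ pyRepeat (b % 200 % 50 % 10 % 5) ","

def to_bottom_alt (text : String) : String :=
  String.join (text.toList.map (fun c => to_bottom_section c.toNat ++ "👉👈"))

-- ===== PRECONDITION & SPEC =====
def Spec_to_bottom (text : String) (out : String) : Prop := out = to_bottom_alt text
instance (text : String) (out : String) : Decidable (Spec_to_bottom text out) := by unfold Spec_to_bottom; infer_instance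

-- ===== CLAIM (what is proved, stated in full; the proofs are below) =====
def Claim_equal_to_bottom : Prop := ∀ (text : String), Dom_to_bottom text → Spec_to_bottom text (to_bottom text)

-- ===== LEMMAS AND PROOFS =====

theorem to_bottom_loop_acc (n : Nat) : ∀ acc, to_bottom_loop n acc = acc ++ to_bottom_loop n "" := by
  induction n using Nat.strong_induction_on with
  | _ n ih =>
    intro acc
    match n with
    | 0 => simp [to_bottom_loop]
    | m+1 =>
      rw [to_bottom_loop, to_bottom_loop]
      split_ifs with h1 h2 h3 h4 <;>
        rw [ih _ (by omega), ih _ (by omega) (("" : String) ++ _)] <;>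
        simp [String.append_assoc]

theorem pyRepeat_succ_div (b v : Nat) (hv : 0 < v) (h : v ≤ b) (s : String) :
    pyRepeat (b / v) s = s ++ pyRepeat ((b - v) / v) s := by
  have : b / v = (b - v) / v + 1 := by
    have h2 : b = (b - v) + v := by omega
    rw [h2, Nat.add_div_right _ hv]
    simp
  rw [this, pyRepeat]

theorem mod_sub_self (b v : Nat) (h : v ≤ b) : (b - v) % v = b % v := by
  conv_rhs => rw [show b = (b - v) + v by omega]
  simp [Nat.add_mod_right]

theorem join_cons (x : String) (l : List String) : String.join (x :: l) = x ++ String.join l := by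
  have h : ∀ (l : List String) (a : String),
      List.foldl (fun r s => r ++ s) a l = a ++ List.foldl (fun r s => r ++ s) "" l := by
    intro l
    induction l with
    | nil => intro a; simp
    | cons y l ih =>
      intro a
      simp only [List.foldl_cons]
      rw [ih (a ++ y), ih ("" ++ y)]
      simp [String.append_assoc]
  simp only [String.join, List.foldl_cons]
  rw [h l ("" ++ x)]
  simp

theorem to_bottom_loop_eq (n : Nat) : to_bottom_loop n "" = to_bottom_section n := by
  induction n using Nat.strong_induction_on with
  | _ n ih =>
    match n with
    | 0 => simp [to_bottom_loop, to_bottom_section, pyRepeat]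
    | m+1 =>
      rw [to_bottom_loop]
      split_ifs with h1 h2 h3 h4
      · rw [to_bottom_loop_acc, ih (m+1-200) (by omega)]
        unfold to_bottom_section
        rw [pyRepeat_succ_div (m+1) 200 (by omega) h1]
        have e : (m+1) % 200 = (m+1-200) % 200 := (mod_sub_self _ _ h1).symm
        rw [e]
        simp [String.append_assoc]
      · rw [to_bottom_loop_acc, ih (m+1-50) (by omega)]
        unfold to_bottom_section
        have e200 : ∀ k, k < 200 → k / 200 = 0 ∧ k % 200 = k := by
          intro k hk; exact ⟨Nat.div_eq_of_lt hk, Nat.mod_eq_of_lt hk⟩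
        obtain ⟨d1, r1⟩ := e200 (m+1) (by omega)
        obtain ⟨d2, r2⟩ := e200 (m+1-50) (by omega)
        rw [d1, r1, d2, r2, pyRepeat_succ_div (m+1) 50 (by omega) h2,
          (mod_sub_self (m+1) 50 h2).symm]
        simp [pyRepeat, String.append_assoc]
      · rw [to_bottom_loop_acc, ih (m+1-10) (by omega)]
        unfold to_bottom_section
        have r1 : (m+1) % 200 = m+1 := Nat.mod_eq_of_lt (by omega)
        have r2 : (m+1-10) % 200 = m+1-10 := Nat.mod_eq_of_lt (by omega)
        have s1 : (m+1) % 50 = m+1 := Nat.mod_eq_of_lt (by omega)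
        have s2 : (m+1-10) % 50 = m+1-10 := Nat.mod_eq_of_lt (by omega)
        have d1 : (m+1) / 200 = 0 := Nat.div_eq_of_lt (by omega)
        have d2 : (m+1-10) / 200 = 0 := Nat.div_eq_of_lt (by omega)
        have f1 : (m+1) / 50 = 0 := Nat.div_eq_of_lt (by omega)
        have f2 : (m+1-10) / 50 = 0 := Nat.div_eq_of_lt (by omega)
        rw [r1, r2, s1, s2, d1, d2, f1, f2, pyRepeat_succ_div (m+1) 10 (by omega) h3,
          (mod_sub_self (m+1) 10 h3).symm]
        simp [pyRepeat, String.append_assoc]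
      · rw [to_bottom_loop_acc, ih (m+1-5) (by omega)]
        unfold to_bottom_section
        have r1 : (m+1) % 200 = m+1 := Nat.mod_eq_of_lt (by omega)
        have r2 : (m+1-5) % 200 = m+1-5 := Nat.mod_eq_of_lt (by omega)
        have s1 : (m+1) % 50 = m+1 := Nat.mod_eq_of_lt (by omega)
        have s2 : (m+1-5) % 50 = m+1-5 := Nat.mod_eq_of_lt (by omega)
        have t1 : (m+1) % 10 = m+1 := Nat.mod_eq_of_lt (by omega)
        have t2 : (m+1-5) % 10 = m+1-5 := Nat.mod_eq_of_lt (by omega)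
        have d1 : (m+1) / 200 = 0 := Nat.div_eq_of_lt (by omega)
        have d2 : (m+1-5) / 200 = 0 := Nat.div_eq_of_lt (by omega)
        have f1 : (m+1) / 50 = 0 := Nat.div_eq_of_lt (by omega)
        have f2 : (m+1-5) / 50 = 0 := Nat.div_eq_of_lt (by omega)
        have g1 : (m+1) / 10 = 0 := Nat.div_eq_of_lt (by omega)
        have g2 : (m+1-5) / 10 = 0 := Nat.div_eq_of_lt (by omega)
        rw [r1, r2, s1, s2, t1, t2, d1, d2, f1, f2, g1, g2,
          pyRepeat_succ_div (m+1) 5 (by omega) h4, (mod_sub_self (m+1) 5 h4).symm]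
        simp [pyRepeat, String.append_assoc]
      · rw [to_bottom_loop_acc, ih m (by omega)]
        unfold to_bottom_section
        have r1 : (m+1) % 200 = m+1 := Nat.mod_eq_of_lt (by omega)
        have r2 : m % 200 = m := Nat.mod_eq_of_lt (by omega)
        have s1 : (m+1) % 50 = m+1 := Nat.mod_eq_of_lt (by omega)
        have s2 : m % 50 = m := Nat.mod_eq_of_lt (by omega)
        have t1 : (m+1) % 10 = m+1 := Nat.mod_eq_of_lt (by omega)
        have t2 : m % 10 = m := Nat.mod_eq_of_lt (by omega)
        have u1 : (m+1) % 5 = m+1 := Nat.mod_eq_of_lt (by omega)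
        have u2 : m % 5 = m := Nat.mod_eq_of_lt (by omega)
        have d1 : (m+1) / 200 = 0 := Nat.div_eq_of_lt (by omega)
        have d2 : m / 200 = 0 := Nat.div_eq_of_lt (by omega)
        have f1 : (m+1) / 50 = 0 := Nat.div_eq_of_lt (by omega)
        have f2 : m / 50 = 0 := Nat.div_eq_of_lt (by omega)
        have g1 : (m+1) / 10 = 0 := Nat.div_eq_of_lt (by omega)
        have g2 : m / 10 = 0 := Nat.div_eq_of_lt (by omega)
        have k1 : (m+1) / 5 = 0 := Nat.div_eq_of_lt (by omega)
        have k2 : m / 5 = 0 := Nat.div_eq_of_lt (by omega)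
        rw [r1, r2, s1, s2, t1, t2, u1, u2, d1, d2, f1, f2, g1, g2, k1, k2]
        simp [pyRepeat]

theorem foldl_join (l : List Char) : ∀ acc : String,
    l.foldl (fun out c => to_bottom_loop c.toNat out ++ "👉👈") acc
      = acc ++ String.join (l.map (fun c => to_bottom_section c.toNat ++ "👉👈")) := by
  induction l with
  | nil => intro acc; simp [String.join]
  | cons c l ih =>
    intro acc
    simp only [List.foldl_cons, List.map_cons, join_cons]
    rw [ih, to_bottom_loop_acc, to_bottom_loop_eq]
    simp [String.append_assoc]

-- ===== VERDICT (by name: the statement is the Claim_ definition above) =====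
theorem to_bottom_spec : Claim_equal_to_bottom := by
  intro text _
  show to_bottom text = to_bottom_alt text
  unfold to_bottom to_bottom_alt
  simpa using foldl_join text.toList ""
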